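-- pv_equiv track=rewrite | github.com/Pradyumna2669/admin-hub-main | discord_bot/cogs/admin_hub.py | meets_minimum_cqs
-- ===== SOURCE A (Python) =====
-- from typing import Any, Dict, List, Optional, Tuple
--
-- CQS_RANKS = {
--     "low": 0,
--     "moderate": 1,
--     "high": 2,
--     "highest": 3,
-- }
--
-- def normalize_cqs_level(value: Optional[str]) -> Optional[str]:
--     if not value:
--         return None
--     normalized = value.strip().lower()
--     if normalized in CQS_RANKS:
--         return normalized
--     return None
--
-- def meets_minimum_cqs(worker_cqs: Optional[str], task_cqs_levels: Optional[List[str]]) -> bool: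
--     valid_levels = [
--         normalize_cqs_level(level)
--         for level in (task_cqs_levels or [])
--         if normalize_cqs_level(level) is not None
--     ]
--     if not valid_levels:
--         return True
--     worker_level = normalize_cqs_level(worker_cqs)
--     if not worker_level:
--         return False
--     minimum_required = min(CQS_RANKS[level] for level in valid_levels)
--     return CQS_RANKS[worker_level] >= minimum_required
-- ===== SOURCE B (Python) =====
-- from typing import List, Optional
--
-- CQS_RANKS = {
--     "low": 0,
--     "moderate": 1,
--     "high": 2,
--     "highest": 3,
-- }
--
-- def normalize_cqs_level(value: Optional[str]) -> Optional[str]: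
--     if not value:
--         return None
--     normalized = value.strip().lower()
--     if normalized in CQS_RANKS:
--         return normalized
--     return None
--
-- def meets_minimum_cqs(worker_cqs: Optional[str], task_cqs_levels: Optional[List[str]]) -> bool:
--     # Bucket-count the valid required levels per rank instead of keeping a list
--     # and computing a minimum: one pass fills counts[0..3]; emptiness is
--     # sum(counts) == 0, and the decision is "some requirement at a rank <= the
--     # worker's rank exists", i.e. a positive prefix sum of the buckets.
--     counts = [0, 0, 0, 0]
--     for level in (task_cqs_levels or []):
--         normalized = normalize_cqs_level(level)
--         if normalized is not None:
--             counts[CQS_RANKS[normalized]] += 1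
--     if sum(counts) == 0:
--         return True
--     worker_level = normalize_cqs_level(worker_cqs)
--     if not worker_level:
--         return False
--     return sum(counts[:CQS_RANKS[worker_level] + 1]) > 0
-- ===== Notes on version B (the rewrite author's own statement) =====
-- stated objective: alternative
-- what changed: Replaced 'collect the list of valid normalized levels, take the minimum rank, compare once' by a bucket-counting pass: a fixed 4-slot counter array is filled per rank, emptiness becomes sum(counts)==0, and the decision becomes a positive prefix sum of the buckets up to the worker's rank (no list of levels and no minimum are maintained).
import Mathlib
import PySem

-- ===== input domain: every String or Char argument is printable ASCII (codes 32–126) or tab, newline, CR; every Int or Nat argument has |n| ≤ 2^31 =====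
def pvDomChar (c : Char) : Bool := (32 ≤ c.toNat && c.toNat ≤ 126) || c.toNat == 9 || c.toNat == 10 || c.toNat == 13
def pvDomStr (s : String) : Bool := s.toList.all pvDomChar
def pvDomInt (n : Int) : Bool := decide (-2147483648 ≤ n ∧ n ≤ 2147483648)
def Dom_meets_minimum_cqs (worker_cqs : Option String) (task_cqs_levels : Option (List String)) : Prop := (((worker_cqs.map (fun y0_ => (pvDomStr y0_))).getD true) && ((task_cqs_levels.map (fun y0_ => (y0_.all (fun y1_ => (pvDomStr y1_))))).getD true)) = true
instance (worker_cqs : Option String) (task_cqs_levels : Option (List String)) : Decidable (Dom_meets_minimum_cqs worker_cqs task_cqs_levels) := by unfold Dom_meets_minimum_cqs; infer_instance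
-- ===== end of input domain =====

-- B replaces 'collect valid levels, take the minimum rank, compare' with a bucket-counting
-- pass (4 per-rank counters) and a positive-prefix-sum decision (objective: alternative).

-- ===== PORT A =====
-- CQS_RANKS lookup; exact for the four keys normalize_cqs_level can return
def cqsRank (s : String) : Int :=
  if s = "low" then 0 else if s = "moderate" then 1 else if s = "high" then 2 else 3

-- shared helper normalize_cqs_level (strip/lower per PySem; 'not value' = None or empty)
def normalize_cqs_level (value : Option String) : Option String :=
  match value with
  | none => none
  | some s =>
    if s.toList = [] then none
    else
      let normalized := PySem.Str.lower (PySem.Str.strip s)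
      if normalized = "low" ∨ normalized = "moderate" ∨ normalized = "high" ∨ normalized = "highest"
      then some normalized else none

def meets_minimum_cqs (worker_cqs : Option String) (task_cqs_levels : Option (List String)) : Bool :=
  let valid_levels := (task_cqs_levels.getD []).filterMap (fun level => normalize_cqs_level (some level))
  if valid_levels = [] then true
  else
    match normalize_cqs_level worker_cqs with
    | none => false
    | some worker_level =>
      match PySem.List.min? (valid_levels.map cqsRank) (fun x => x) with
      | none => true  -- unreachable: valid_levels ≠ []
      | some minimum_required => cqsRank worker_level ≥ minimum_required

-- ===== PORT B =====
-- counts[CQS_RANKS[normalized]] += 1 : the index is always 0..3 (in range, nonnegative),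
-- so List.getD/List.set with .toNat is exact here.
def meets_minimum_cqs_alt (worker_cqs : Option String) (task_cqs_levels : Option (List String)) : Bool :=
  let counts : List Int := (task_cqs_levels.getD []).foldl (fun counts level =>
    match normalize_cqs_level (some level) with
    | some normalized =>
        counts.set (cqsRank normalized).toNat ((counts.getD (cqsRank normalized).toNat 0) + 1)
    | none => counts) [0, 0, 0, 0]
  if counts.sum = 0 then true
  else
    match normalize_cqs_level worker_cqs with
    | none => false
    | some worker_level =>
      decide (0 < (counts.take ((cqsRank worker_level).toNat + 1)).sum)

-- ===== PRECONDITION & SPEC =====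
def Spec_meets_minimum_cqs (worker_cqs : Option String) (task_cqs_levels : Option (List String)) (out : Bool) : Prop := out = meets_minimum_cqs_alt worker_cqs task_cqs_levels
instance (worker_cqs : Option String) (task_cqs_levels : Option (List String)) (out : Bool) : Decidable (Spec_meets_minimum_cqs worker_cqs task_cqs_levels out) := by unfold Spec_meets_minimum_cqs; infer_instance

-- ===== CLAIM (what is proved, stated in full; the proofs are below) =====
def Claim_equal_meets_minimum_cqs : Prop := ∀ (worker_cqs : Option String) (task_cqs_levels : Option (List String)), Dom_meets_minimum_cqs worker_cqs task_cqs_levels → Spec_meets_minimum_cqs worker_cqs task_cqs_levels (meets_minimum_cqs worker_cqs task_cqs_levels)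

-- ===== LEMMAS AND PROOFS =====

-- normalize only ever returns one of the four rank names
theorem normalize_cases (v : Option String) (n : String)
    (h : normalize_cqs_level v = some n) :
    n = "low" ∨ n = "moderate" ∨ n = "high" ∨ n = "highest" := by
  cases v with
  | none => simp [normalize_cqs_level] at h
  | some s =>
    simp only [normalize_cqs_level] at h
    split_ifs at h with h1 h2
    · rcases h2 with h2 | h2 | h2 | h2 <;> rw [h2, Option.some.injEq] at h <;> subst h <;> simp

-- abbreviation used only in the proofs: ranks of the valid levels
def pvRanks (task_cqs_levels : Option (List String)) : List Int :=
  ((task_cqs_levels.getD []).filterMap (fun level => normalize_cqs_level (some level))).map cqsRank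

theorem pvRanks_bounded (t : Option (List String)) :
    ∀ r ∈ pvRanks t, r = 0 ∨ r = 1 ∨ r = 2 ∨ r = 3 := by
  intro r hr
  simp only [pvRanks, List.mem_map, List.mem_filterMap] at hr
  obtain ⟨n, ⟨l, _, hn⟩, rfl⟩ := hr
  rcases normalize_cases _ _ hn with h | h | h | h <;> simp [h, cqsRank]

-- B's fold fills the four buckets with the per-rank counts of A's valid levels
theorem fold_counts (xs : List String) (a b c d : Int) :
    xs.foldl (fun counts level =>
      match normalize_cqs_level (some level) with
      | some normalized =>
          counts.set (cqsRank normalized).toNat ((counts.getD (cqsRank normalized).toNat 0) + 1)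
      | none => counts) [a, b, c, d]
    = [a + ((xs.filterMap (fun l => normalize_cqs_level (some l))).map cqsRank).count 0,
       b + ((xs.filterMap (fun l => normalize_cqs_level (some l))).map cqsRank).count 1,
       c + ((xs.filterMap (fun l => normalize_cqs_level (some l))).map cqsRank).count 2,
       d + ((xs.filterMap (fun l => normalize_cqs_level (some l))).map cqsRank).count 3] := by
  induction xs generalizing a b c d with
  | nil => simp
  | cons h t ih =>
    simp only [List.foldl_cons, List.filterMap_cons]
    cases hn : normalize_cqs_level (some h) with
    | none =>
      simp only [hn]
      exact ih a b c d
    | some n =>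
      simp only [hn]
      rcases normalize_cases _ _ hn with hn' | hn' | hn' | hn' <;> subst hn'
      · rw [show (([a, b, c, d] : List Int).set (cqsRank "low").toNat
            ((([a, b, c, d] : List Int).getD (cqsRank "low").toNat 0) + 1)) = [a + 1, b, c, d] from rfl,
          ih]
        simp [show cqsRank "low" = (0 : Int) from rfl]
        omega
      · rw [show (([a, b, c, d] : List Int).set (cqsRank "moderate").toNat
            ((([a, b, c, d] : List Int).getD (cqsRank "moderate").toNat 0) + 1)) = [a, b + 1, c, d] from rfl,
          ih]
        simp [show cqsRank "moderate" = (1 : Int) from rfl]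
        omega
      · rw [show (([a, b, c, d] : List Int).set (cqsRank "high").toNat
            ((([a, b, c, d] : List Int).getD (cqsRank "high").toNat 0) + 1)) = [a, b, c + 1, d] from rfl,
          ih]
        simp [show cqsRank "high" = (2 : Int) from rfl]
        omega
      · rw [show (([a, b, c, d] : List Int).set (cqsRank "highest").toNat
            ((([a, b, c, d] : List Int).getD (cqsRank "highest").toNat 0) + 1)) = [a, b, c, d + 1] from rfl,
          ih]
        simp [show cqsRank "highest" = (3 : Int) from rfl]
        omega

-- the four bucket counts sum to the number of valid levels
theorem counts_sum_length (R : List Int) (h : ∀ r ∈ R, r = 0 ∨ r = 1 ∨ r = 2 ∨ r = 3) :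
    ((R.count 0 : Int)) + R.count 1 + R.count 2 + R.count 3 = R.length := by
  induction R with
  | nil => simp
  | cons x xs ih =>
    have hx := h x (by simp)
    have ih' := ih (fun r hr => h r (by simp [hr]))
    rcases hx with rfl | rfl | rfl | rfl <;>
      simp <;> omega

-- membership form of 'some required rank is ≤ w'
theorem exists_le_iff (R : List Int) (hR : ∀ r ∈ R, r = 0 ∨ r = 1 ∨ r = 2 ∨ r = 3) (w : Int) :
    (∃ r ∈ R, r ≤ w) ↔ ((0 ∈ R ∧ (0:Int) ≤ w) ∨ (1 ∈ R ∧ (1:Int) ≤ w) ∨ (2 ∈ R ∧ (2:Int) ≤ w) ∨ (3 ∈ R ∧ (3:Int) ≤ w)) := by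
  constructor
  · rintro ⟨r, hr, hle⟩
    rcases hR r hr with rfl | rfl | rfl | rfl <;> tauto
  · rintro (⟨h, hw'⟩ | ⟨h, hw'⟩ | ⟨h, hw'⟩ | ⟨h, hw'⟩) <;> exact ⟨_, h, hw'⟩

-- positive prefix sum of the buckets ↔ some required rank is ≤ the worker's rank
theorem prefix_pos_iff (R : List Int) (hR : ∀ r ∈ R, r = 0 ∨ r = 1 ∨ r = 2 ∨ r = 3)
    (w : Int) (hw : w = 0 ∨ w = 1 ∨ w = 2 ∨ w = 3) :
    (0 < (([(R.count 0 : Int), R.count 1, R.count 2, R.count 3].take (w.toNat + 1)).sum))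
      ↔ ∃ r ∈ R, r ≤ w := by
  have hc : ∀ i : Int, (0 < (R.count i : Int)) ↔ i ∈ R := by
    intro i
    rw [Int.natCast_pos, List.count_pos_iff]
  rcases hw with rfl | rfl | rfl | rfl <;>
    simp only [show ((0 : Int)).toNat = 0 from rfl, show ((1 : Int)).toNat = 1 from rfl,
      show ((2 : Int)).toNat = 2 from rfl, show ((3 : Int)).toNat = 3 from rfl,
      List.take_succ_cons, List.take_zero, List.sum_cons, List.sum_nil, add_zero, zero_add] <;>
    rw [exists_le_iff R hR, ← hc 0, ← hc 1, ← hc 2, ← hc 3] <;> omega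

-- 'w ≥ min of ranks' is 'some rank is ≤ w'
theorem ge_min_iff_any (w : Int) (xs : List Int) (m : Int)
    (hm : PySem.List.min? xs (fun x => x) = some m) :
    (w ≥ m) ↔ ∃ r ∈ xs, r ≤ w := by
  constructor
  · intro h
    exact ⟨m, PySem.List.min?_mem hm, h⟩
  · rintro ⟨r, hr, hle⟩
    exact le_trans (PySem.List.min?_isMin hm r hr) hle

-- ===== VERDICT (by name: the statement is the Claim_ definition above) =====
theorem meets_minimum_cqs_spec : Claim_equal_meets_minimum_cqs := by
  intro worker_cqs task_cqs_levels _
  unfold Spec_meets_minimum_cqs meets_minimum_cqs meets_minimum_cqs_alt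
  rw [fold_counts]
  simp only [zero_add]
  set vl := (task_cqs_levels.getD []).filterMap (fun level => normalize_cqs_level (some level)) with hvl
  have hbound : ∀ r ∈ vl.map cqsRank, r = 0 ∨ r = 1 ∨ r = 2 ∨ r = 3 := pvRanks_bounded task_cqs_levels
  have hsum : (((vl.map cqsRank).count 0 : Int)) + (vl.map cqsRank).count 1
      + (vl.map cqsRank).count 2 + (vl.map cqsRank).count 3 = (vl.map cqsRank).length :=
    counts_sum_length _ hbound
  by_cases he : vl = []
  · simp [he]
  · have hlen : (vl.map cqsRank).length ≠ 0 := by simpa using he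
    have hsum0 : ¬ ([((vl.map cqsRank).count 0 : Int), (vl.map cqsRank).count 1,
        (vl.map cqsRank).count 2, (vl.map cqsRank).count 3].sum = 0) := by
      simp only [List.sum_cons, List.sum_nil]
      omega
    simp only [he, if_false, hsum0]
    cases hw : normalize_cqs_level worker_cqs with
    | none => rfl
    | some wl =>
      have hne : vl.map cqsRank ≠ [] := by simpa using he
      cases hm : PySem.List.min? (vl.map cqsRank) (fun x => x) with
      | none => rw [PySem.List.min?_eq_none_iff] at hm; exact absurd hm hne
      | some m =>
        have hwb : cqsRank wl = 0 ∨ cqsRank wl = 1 ∨ cqsRank wl = 2 ∨ cqsRank wl = 3 := by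
          rcases normalize_cases _ _ hw with h | h | h | h <;> simp [h, cqsRank]
        have h1 := ge_min_iff_any (cqsRank wl) (vl.map cqsRank) m hm
        have h2 := prefix_pos_iff (vl.map cqsRank) hbound (cqsRank wl) hwb
        dsimp only
        rw [decide_eq_decide]
        exact h1.trans h2.symm
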